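-- pv_equiv track=rewrite | github.com/shashidharpagonda/HelloWorld | cbsclab/eprogram5.py | series2
-- ===== SOURCE A (Python) =====
-- def series2(x,n):
--     total=1
--     for i in range(1,n+1):
--         if i<=n:
--             if i%2 != 0:
--                 total= total - pow(x,i)
--             elif i%2 == 0:
--                 total = total + pow(x, i)
--     return total
-- ===== SOURCE B (Python) =====
-- def series2(x, n):
--     # B: one pass maintaining the running power (-x)**i incrementally,
--     # instead of recomputing pow(x, i) at every step.
--     total = 1
--     p = 1
--     for _ in range(1, n + 1):
--         p *= -x
--         total += p
--     return total
-- ===== Notes on version B (the rewrite author's own statement) =====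
-- stated objective: faster
-- what changed: B keeps a running power p *= -x updated once per iteration instead of calling pow(x, i) afresh each iteration, turning the quadratic number of multiplications into a linear one.
import Mathlib
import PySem

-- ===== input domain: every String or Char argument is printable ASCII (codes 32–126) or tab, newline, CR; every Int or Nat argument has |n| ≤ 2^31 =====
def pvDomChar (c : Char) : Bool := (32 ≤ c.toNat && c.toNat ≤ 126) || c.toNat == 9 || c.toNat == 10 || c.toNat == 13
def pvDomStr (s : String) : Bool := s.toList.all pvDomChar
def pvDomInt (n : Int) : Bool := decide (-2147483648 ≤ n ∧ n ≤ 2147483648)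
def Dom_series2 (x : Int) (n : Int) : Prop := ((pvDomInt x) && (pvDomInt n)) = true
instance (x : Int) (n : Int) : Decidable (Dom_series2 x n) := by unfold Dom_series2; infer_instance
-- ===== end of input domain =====

-- B replaces A's per-iteration pow(x, i) by a running power updated once per step (objective: faster).

-- ===== PORT A =====
-- step of A's loop body (i ranges over range(1, n+1); pow(x, i) with i ≥ 1 is x ^ i.toNat)
def series2StepA (x n : Int) (total : Int) (i : Int) : Int :=
  if i ≤ n then
    if PySem.Int.mod i 2 ≠ 0 then total - x ^ i.toNat
    else if PySem.Int.mod i 2 = 0 then total + x ^ i.toNat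
    else total
  else total

def series2 (x : Int) (n : Int) : Int :=
  (PySem.List.pyRange 1 (n + 1) 1).foldl (series2StepA x n) 1

-- ===== PORT B =====
-- step of B's loop body: state (total, p), p *= -x; total += p
def series2StepB (x : Int) (s : Int × Int) (_i : Int) : Int × Int :=
  (s.1 + s.2 * (-x), s.2 * (-x))

def series2_alt (x : Int) (n : Int) : Int :=
  ((PySem.List.pyRange 1 (n + 1) 1).foldl (series2StepB x) (1, 1)).1

-- ===== PRECONDITION & SPEC =====
def Spec_series2 (x : Int) (n : Int) (out : Int) : Prop := out = series2_alt x n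
instance (x : Int) (n : Int) (out : Int) : Decidable (Spec_series2 x n out) := by unfold Spec_series2; infer_instance

-- ===== CLAIM (what is proved, stated in full; the proofs are below) =====
def Claim_equal_series2 : Prop := ∀ (x : Int) (n : Int), Dom_series2 x n → Spec_series2 x n (series2 x n)

-- ===== LEMMAS AND PROOFS =====

-- loop invariant: over the first m steps, B's total equals A's total and B's power is (-x)^m
lemma series2_key (x n : Int) (m : Nat) (h : (m : Int) ≤ n) :
    (PySem.List.pyRange 1 ((m : Int) + 1) 1).foldl (series2StepB x) (1, 1)
      = ((PySem.List.pyRange 1 ((m : Int) + 1) 1).foldl (series2StepA x n) 1, (-x) ^ m) := by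
  induction m with
  | zero =>
      rw [PySem.List.pyRange_one_eq_nil (by norm_num)]
      simp
  | succ m ih =>
      have hm : (m : Int) ≤ n := by push_cast at h ⊢; omega
      have hsplit : PySem.List.pyRange 1 ((m : Int) + 1 + 1) 1
          = PySem.List.pyRange 1 ((m : Int) + 1) 1 ++ [(m : Int) + 1] := by
        have := PySem.List.pyRange_one_succ_right (a := 1) (b := (m : Int) + 1) (by omega)
        simpa using this
      have hcast : ((m + 1 : Nat) : Int) + 1 = (m : Int) + 1 + 1 := by push_cast; ring
      rw [hcast, hsplit, List.foldl_append, List.foldl_append, ih hm]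
      simp only [List.foldl_cons, List.foldl_nil, series2StepA, series2StepB]
      have hle : (m : Int) + 1 ≤ n := by push_cast at h; omega
      have htn : ((m : Int) + 1).toNat = m + 1 := by omega
      have hmod : PySem.Int.mod ((m : Int) + 1) 2 = ((m : Int) + 1) % 2 :=
        PySem.Int.mod_eq_emod_of_pos (by omega)
      rcases Nat.even_or_odd (m + 1) with he | ho
      · have hei : Even ((m : Int) + 1) := by
          rcases he with ⟨k, hk⟩; exact ⟨(k : Int), by omega⟩
        have h2 : ((m : Int) + 1) % 2 = 0 := Int.even_iff.mp hei
        have hnp : (-x) ^ (m + 1) = x ^ (m + 1) := Even.neg_pow he x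
        simp only [hle, if_true, hmod, h2, htn, ne_eq, not_true_eq_false, if_false,
          not_false_eq_true, Prod.mk.injEq]
        constructor
        · rw [show (-x) ^ m * -x = (-x) ^ (m + 1) from (pow_succ _ _).symm, hnp]
        · rw [show (-x) ^ m * -x = (-x) ^ (m + 1) from (pow_succ _ _).symm]
      · have hoi : Odd ((m : Int) + 1) := by
          rcases ho with ⟨k, hk⟩; exact ⟨(k : Int), by omega⟩
        have h2 : ((m : Int) + 1) % 2 = 1 := Int.odd_iff.mp hoi
        have hnp : (-x) ^ (m + 1) = -(x ^ (m + 1)) := Odd.neg_pow ho x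
        simp only [hle, if_true, hmod, h2, htn, ne_eq, one_ne_zero, not_false_eq_true, if_true,
          Prod.mk.injEq]
        constructor
        · rw [show (-x) ^ m * -x = (-x) ^ (m + 1) from (pow_succ _ _).symm, hnp]; ring
        · rw [show (-x) ^ m * -x = (-x) ^ (m + 1) from (pow_succ _ _).symm]

-- ===== VERDICT (by name: the statement is the Claim_ definition above) =====
theorem series2_spec : Claim_equal_series2 := by
  intro x n _
  unfold Spec_series2 series2 series2_alt
  by_cases hn : n ≤ 0
  · rw [PySem.List.pyRange_one_eq_nil (by omega)]
    simp
  · have hm : ((n.toNat : Int)) = n := Int.toNat_of_nonneg (by omega)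
    have hk := series2_key x n n.toNat (by omega)
    rw [hm] at hk
    rw [hk]
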